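-- pv_equiv track=rewrite | github.com/adpena/molt | tools/bench_report.py | _baseline_summary
-- ===== SOURCE A (Python) =====
-- from typing import Any
--
-- def _display_name(name: str) -> str:
--     return name if name.endswith(".py") else f"{name}.py"
--
-- def _format_name_list(names: list[str], limit: int = 8) -> str:
--     if len(names) <= limit:
--         return ", ".join(f"`{name}`" for name in names)
--     return (
--         f"{', '.join(f'`{name}`' for name in names[:limit])}, "
--         f"and {len(names) - limit} more"
--     )
--
-- def _baseline_summary(native_bench: dict[str, Any]) -> str:
--     parts: list[str] = []
--     lane_labels = {
--         "pypy": "PyPy",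
--         "codon": "Codon",
--         "nuitka": "Nuitka",
--         "pyodide": "Pyodide",
--     }
--     for lane, label in lane_labels.items():
--         ok_key = f"{lane}_ok"
--         available = any(entry.get(ok_key) for entry in native_bench.values())
--         if not available:
--             parts.append(f"{label} baseline unavailable")
--             continue
--         missing = sorted(
--             _display_name(name)
--             for name, entry in native_bench.items()
--             if not entry.get(ok_key)
--         )
--         if missing:
--             parts.append(f"{label} skipped for {_format_name_list(missing)}")
--
--     if not parts:
--         return "none"
--     return "; ".join(parts)
-- ===== SOURCE B (Python) =====
-- def _display_name(name: str) -> str: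
--     return name if name.endswith(".py") else f"{name}.py"
--
--
-- def _format_name_list(names: list[str], limit: int = 8) -> str:
--     if len(names) <= limit:
--         return ", ".join(f"`{name}`" for name in names)
--     return (
--         f"{', '.join(f'`{name}`' for name in names[:limit])}, "
--         f"and {len(names) - limit} more"
--     )
--
--
-- def _baseline_summary(native_bench) -> str:
--     lanes = [("pypy", "PyPy"), ("codon", "Codon"), ("nuitka", "Nuitka"), ("pyodide", "Pyodide")]
--     # one pass over the entries, accumulating per-lane availability and missing names
--     state = [(lane, label, False, []) for lane, label in lanes]
--     for name, entry in native_bench.items():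
--         disp = _display_name(name)
--         for i, (lane, label, avail, missing) in enumerate(state):
--             if entry.get(lane + "_ok"):
--                 state[i] = (lane, label, True, missing)
--             else:
--                 missing.append(disp)
--     parts = []
--     for lane, label, avail, missing in state:
--         if not avail:
--             parts.append(f"{label} baseline unavailable")
--         elif missing:
--             parts.append(f"{label} skipped for {_format_name_list(sorted(missing))}")
--     return "; ".join(parts) if parts else "none"
-- ===== Notes on version B (the rewrite author's own statement) =====
-- stated objective: alternative
-- what changed: A scans the whole benchmark dict twice per lane (an any() plus a filtered sorted-generator for each of the four lanes); B makes a single pass over native_bench.items() that accumulates per-lane availability and missing display names at once, then assembles the parts from the accumulators.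
import Mathlib
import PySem

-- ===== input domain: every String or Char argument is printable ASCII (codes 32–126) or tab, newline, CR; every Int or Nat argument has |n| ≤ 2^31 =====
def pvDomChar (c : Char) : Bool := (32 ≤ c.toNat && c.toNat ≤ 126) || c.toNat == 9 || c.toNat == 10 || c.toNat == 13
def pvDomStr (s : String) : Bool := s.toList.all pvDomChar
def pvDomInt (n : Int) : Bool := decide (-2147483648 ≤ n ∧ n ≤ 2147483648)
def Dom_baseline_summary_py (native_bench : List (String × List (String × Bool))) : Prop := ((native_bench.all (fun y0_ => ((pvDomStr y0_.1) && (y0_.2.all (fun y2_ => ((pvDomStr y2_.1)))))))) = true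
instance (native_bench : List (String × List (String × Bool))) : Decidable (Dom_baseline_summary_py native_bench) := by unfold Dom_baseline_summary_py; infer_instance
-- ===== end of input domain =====

-- B replaces A's four per-lane scans (an `any` plus a filtered generator per lane) by one pass over
-- the entries that accumulates availability and the missing names for all lanes at once (objective:
-- alternative decomposition, same asymptotic cost).

-- ===== PORT A =====
-- shared module helpers (used verbatim by both Pythons)
def display_name (name : String) : String :=
  if PySem.Str.endswith name ".py" then name else name ++ ".py"

def format_name_list (names : List String) (limit : Int) : String :=
  if (names.length : Int) ≤ limit then
    PySem.Str.join ", " (names.map (fun name => "`" ++ name ++ "`"))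
  else
    PySem.Str.join ", " ((PySem.List.slice names none (some limit)).map (fun name => "`" ++ name ++ "`"))
      ++ ", " ++ "and " ++ PySem.Int.toStr ((names.length : Int) - limit) ++ " more"

-- entry.get(ok_key): the entry dicts hold booleans, so truthiness is the looked-up value (False if absent)
def entryOk (entry : List (String × Bool)) (ok_key : String) : Bool :=
  ((PySem.Dict.mk entry).get? ok_key).getD false

def laneLabelsA : List (String × String) :=
  [("pypy", "PyPy"), ("codon", "Codon"), ("nuitka", "Nuitka"), ("pyodide", "Pyodide")]

def baseline_summary_py (native_bench : List (String × List (String × Bool))) : String :=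
  let parts : List String := laneLabelsA.foldl (fun parts ll =>
    let lane := ll.1
    let label := ll.2
    let ok_key := lane ++ "_ok"
    let available := native_bench.any (fun e => entryOk e.2 ok_key)
    if !available then parts ++ [label ++ " baseline unavailable"]
    else
      let missing := PySem.List.sorted
        ((native_bench.filter (fun e => !entryOk e.2 ok_key)).map (fun e => display_name e.1))
        (fun x => x) false
      if missing.isEmpty then parts
      else parts ++ [label ++ " skipped for " ++ format_name_list missing 8]) []
  if parts.isEmpty then "none" else PySem.Str.join "; " parts

-- ===== PORT B =====
def lanesB : List (String × String) :=
  [("pypy", "PyPy"), ("codon", "Codon"), ("nuitka", "Nuitka"), ("pyodide", "Pyodide")]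

def baseline_summary_py_alt (native_bench : List (String × List (String × Bool))) : String :=
  let state0 : List (String × String × Bool × List String) :=
    lanesB.map (fun p => (p.1, p.2, false, ([] : List String)))
  -- the in-place `state[i] = …` / `missing.append(disp)` pass, as a value-level update of each lane's tuple
  let state := native_bench.foldl (fun st e =>
    let disp := display_name e.1
    st.map (fun q =>
      if entryOk e.2 (q.1 ++ "_ok") then (q.1, q.2.1, true, q.2.2.2)
      else (q.1, q.2.1, q.2.2.1, q.2.2.2 ++ [disp]))) state0
  let parts : List String := state.foldl (fun parts q =>
    if !q.2.2.1 then parts ++ [q.2.1 ++ " baseline unavailable"]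
    else if !q.2.2.2.isEmpty then
      parts ++ [q.2.1 ++ " skipped for "
        ++ format_name_list (PySem.List.sorted q.2.2.2 (fun x => x) false) 8]
    else parts) []
  if parts.isEmpty then "none" else PySem.Str.join "; " parts

-- ===== PRECONDITION & SPEC =====
def Spec_baseline_summary_py (native_bench : List (String × List (String × Bool))) (out : String) : Prop := out = baseline_summary_py_alt native_bench
instance (native_bench : List (String × List (String × Bool))) (out : String) : Decidable (Spec_baseline_summary_py native_bench out) := by unfold Spec_baseline_summary_py; infer_instance

-- ===== CLAIM (what is proved, stated in full; the proofs are below) =====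
def Claim_equal_baseline_summary_py : Prop := ∀ (native_bench : List (String × List (String × Bool))), Dom_baseline_summary_py native_bench → Spec_baseline_summary_py native_bench (baseline_summary_py native_bench)

-- ===== LEMMAS AND PROOFS =====

-- B's single pass, characterised: each lane's accumulator ends as (A's `any`, A's filtered name list)
theorem fold_state (nb : List (String × List (String × Bool)))
    (st : List (String × String × Bool × List String)) :
    nb.foldl (fun st e =>
      st.map (fun q =>
        if entryOk e.2 (q.1 ++ "_ok") then (q.1, q.2.1, true, q.2.2.2)
        else (q.1, q.2.1, q.2.2.1, q.2.2.2 ++ [display_name e.1]))) st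
    = st.map (fun q =>
        (q.1, q.2.1,
         q.2.2.1 || nb.any (fun e => entryOk e.2 (q.1 ++ "_ok")),
         q.2.2.2 ++ (nb.filter (fun e => !entryOk e.2 (q.1 ++ "_ok"))).map (fun e => display_name e.1))) := by
  induction nb generalizing st with
  | nil => simp
  | cons e rest ih =>
    simp only [List.foldl_cons, ih, List.map_map, List.any_cons, List.filter_cons]
    refine List.map_congr_left (fun q _ => ?_)
    by_cases h : entryOk e.2 (q.1 ++ "_ok") = true <;>
      simp [Function.comp, h, List.append_assoc]

theorem baseline_summary_py_eq (nb : List (String × List (String × Bool))) :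
    baseline_summary_py nb = baseline_summary_py_alt nb := by
  unfold baseline_summary_py baseline_summary_py_alt lanesB laneLabelsA
  dsimp only
  rw [fold_state, List.map_map, List.foldl_map]
  refine congrArg (fun parts : List String => if parts.isEmpty then "none" else PySem.Str.join "; " parts) ?_
  refine PySem.List.foldl_congr_mem _ _ _ _ ?_
  intro acc p _
  simp only [Function.comp, Bool.false_or, List.nil_append]
  by_cases h : (nb.any fun e => entryOk e.2 (p.1 ++ "_ok")) = true
  · by_cases hm : (List.map (fun e => display_name e.1)
        (List.filter (fun e => !entryOk e.2 (p.1 ++ "_ok")) nb)) = []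
    · simp [h, hm, List.isEmpty_iff, PySem.List.sorted_eq_nil_iff]
    · simp [h, hm, List.isEmpty_iff, PySem.List.sorted_eq_nil_iff]
      simpa using hm
  · simp [h]

-- ===== VERDICT (by name: the statement is the Claim_ definition above) =====
theorem baseline_summary_py_spec : Claim_equal_baseline_summary_py := by
  intro nb _
  exact baseline_summary_py_eq nb
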